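-- pv_equiv track=rewrite | github.com/nathanielmoon/ml | hw/randomized_optimization/experiments/experiment1.py | get_convergence_point
-- ===== SOURCE A (Python) =====
-- def get_convergence_point(curve):
--     m = max([x[0] for x in curve])
--     idx = -1
--     for f, i in curve:
--         if f == m:
--             idx = i
--             break
--     return idx
-- ===== SOURCE B (Python) =====
-- def get_convergence_point(curve):
--     best = None
--     idx = -1
--     for f, i in curve:
--         if best is None or f > best:
--             best = f
--             idx = i
--     return idx
-- ===== Notes on version B (the rewrite author's own statement) =====
-- stated objective: alternative
-- what changed: Replaces A's two passes (build the list of first components, take its max, then rescan for the first tuple matching it) with a single pass that keeps the running maximum and the index of its first occurrence.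
-- outside the precondition, e.g. on get_convergence_point([]): A raises ValueError, B returns -1
import Mathlib
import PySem

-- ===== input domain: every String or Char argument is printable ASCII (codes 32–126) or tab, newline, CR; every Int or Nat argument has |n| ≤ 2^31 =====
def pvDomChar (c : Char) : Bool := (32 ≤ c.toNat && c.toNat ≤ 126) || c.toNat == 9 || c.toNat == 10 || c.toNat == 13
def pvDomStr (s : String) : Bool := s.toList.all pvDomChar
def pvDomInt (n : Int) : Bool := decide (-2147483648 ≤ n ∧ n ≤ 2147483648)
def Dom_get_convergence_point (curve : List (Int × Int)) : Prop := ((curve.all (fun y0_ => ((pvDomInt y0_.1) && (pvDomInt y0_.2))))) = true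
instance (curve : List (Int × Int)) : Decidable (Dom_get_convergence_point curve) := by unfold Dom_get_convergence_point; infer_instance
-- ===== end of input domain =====

-- B replaces A's two passes (collect firsts, max, rescan for first match) by one pass
-- keeping the running maximum and the index of its first occurrence; on [] (where A raises) B returns -1.

-- ===== PORT A =====
-- the 'for f, i in curve: if f == m: idx = i; break' loop
def gcpLoopA (m : Int) (idx : Int) : List (Int × Int) → Int
  | [] => idx
  | (f, i) :: rest => if f = m then i else gcpLoopA m idx rest

def get_convergence_point (curve : List (Int × Int)) : Int :=
  match PySem.List.max? (curve.map (fun x => x.1)) (fun y => y) with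
  | none => -1  -- unreachable under Pre_: Python's max([]) raises ValueError here
  | some m => gcpLoopA m (-1) curve

-- ===== PORT B =====
-- the single pass: best = None; idx = -1; for f, i: if best is None or f > best: best, idx = f, i
def gcpLoopB (best : Option Int) (idx : Int) : List (Int × Int) → Int
  | [] => idx
  | (f, i) :: rest =>
    match best with
    | none => gcpLoopB (some f) i rest
    | some b => if f > b then gcpLoopB (some f) i rest else gcpLoopB (some b) idx rest

def get_convergence_point_alt (curve : List (Int × Int)) : Int :=
  gcpLoopB none (-1) curve

-- ===== PRECONDITION & SPEC =====
-- Pre_ excludes only the empty list, on which A's max([]) raises ValueError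
def Pre_get_convergence_point (curve : List (Int × Int)) : Prop := curve ≠ []
instance (curve : List (Int × Int)) : Decidable (Pre_get_convergence_point curve) := by unfold Pre_get_convergence_point; infer_instance
def pvWitness_get_convergence_point : (List (Int × Int)) := [(1, 0), (3, 1), (3, 2)]

def Spec_get_convergence_point (curve : List (Int × Int)) (out : Int) : Prop := out = get_convergence_point_alt curve
instance (curve : List (Int × Int)) (out : Int) : Decidable (Spec_get_convergence_point curve out) := by unfold Spec_get_convergence_point; infer_instance

-- ===== CLAIM (what is proved, stated in full; the proofs are below) =====
def Claim_equal_get_convergence_point : Prop := ∀ (curve : List (Int × Int)), Dom_get_convergence_point curve → Pre_get_convergence_point curve → Spec_get_convergence_point curve (get_convergence_point curve)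

-- ===== LEMMAS AND PROOFS =====

lemma foldl_max_le_start (l : List Int) (a : Int) : a ≤ l.foldl max a := by
  induction l generalizing a with
  | nil => simp [List.foldl]
  | cons x t ih => exact le_trans (le_max_left a x) (ih (max a x))

lemma foldl_max_mem (l : List Int) (a : Int) : l.foldl max a = a ∨ l.foldl max a ∈ l := by
  induction l generalizing a with
  | nil => simp [List.foldl]
  | cons x t ih =>
    simp only [List.foldl]
    rcases ih (max a x) with h | h
    · rcases le_total a x with hax | hxa
      · right; rw [h, max_eq_right hax]; exact List.mem_cons_self
      · left; rw [h, max_eq_left hxa]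
    · right; exact List.mem_cons_of_mem _ h

lemma gcpLoopA_idx_irrel (m : Int) (l : List (Int × Int)) (h : m ∈ l.map Prod.fst)
    (idx idx' : Int) : gcpLoopA m idx l = gcpLoopA m idx' l := by
  induction l with
  | nil => simp at h
  | cons p t ih =>
    obtain ⟨f, i⟩ := p
    by_cases hf : f = m
    · simp [gcpLoopA, hf]
    · simp [List.map] at h
      rcases h with h | h
      · exact absurd h.symm hf
      · simp only [gcpLoopA, if_neg hf]
        exact ih (by simpa using h)

-- characterisation of B's loop once best is set
lemma gcpLoopB_some (l : List (Int × Int)) : ∀ b idx : Int,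
    gcpLoopB (some b) idx l =
      if b < (l.map Prod.fst).foldl max b then
        gcpLoopA ((l.map Prod.fst).foldl max b) idx l
      else idx := by
  induction l with
  | nil => intro b idx; simp [gcpLoopB, List.foldl]
  | cons p t ih =>
    intro b idx
    obtain ⟨f, i⟩ := p
    simp only [List.map, List.foldl]
    by_cases hbf : f > b
    · have hmax : max b f = f := max_eq_right (le_of_lt hbf)
      rw [hmax]
      have hfM : f ≤ (t.map Prod.fst).foldl max f := foldl_max_le_start _ _
      have hcond : b < (t.map Prod.fst).foldl max f := lt_of_lt_of_le hbf hfM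
      simp only [gcpLoopB, if_pos hbf, ih f i, if_pos hcond]
      by_cases hfeq : f = (t.map Prod.fst).foldl max f
      · simp [gcpLoopA, ← hfeq, lt_irrefl]
      · have hmem : (t.map Prod.fst).foldl max f ∈ t.map Prod.fst := by
          rcases foldl_max_mem (t.map Prod.fst) f with h | h
          · exact absurd h.symm hfeq
          · exact h
        have hlt : f < (t.map Prod.fst).foldl max f := lt_of_le_of_ne hfM hfeq
        simp only [gcpLoopA, if_neg hfeq, if_pos hlt]
        exact gcpLoopA_idx_irrel _ _ hmem i idx
    · have hfb : f ≤ b := le_of_not_gt hbf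
      have hmax : max b f = b := max_eq_left hfb
      rw [hmax]
      simp only [gcpLoopB, if_neg hbf, ih b idx]
      by_cases hcond : b < (t.map Prod.fst).foldl max b
      · have hfne : f ≠ (t.map Prod.fst).foldl max b :=
          ne_of_lt (lt_of_le_of_lt hfb hcond)
        simp [gcpLoopA, if_pos hcond, if_neg hfne, hcond]
      · simp [if_neg hcond]

-- ===== VERDICT (by name: the statement is the Claim_ definition above) =====
theorem get_convergence_point_spec : Claim_equal_get_convergence_point := by
  intro curve _ hpre
  unfold Spec_get_convergence_point get_convergence_point get_convergence_point_alt
  match curve with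
  | [] => exact absurd rfl hpre
  | (f, i) :: t =>
    rw [show ((f, i) :: t).map (fun x => x.1) = f :: t.map Prod.fst from rfl,
        PySem.List.max?_id_cons]
    simp only [gcpLoopB, gcpLoopB_some]
    have hfM : f ≤ (t.map Prod.fst).foldl max f := foldl_max_le_start _ _
    by_cases hfeq : f = (t.map Prod.fst).foldl max f
    · simp [gcpLoopA, ← hfeq, lt_irrefl]
    · have hlt : f < (t.map Prod.fst).foldl max f := lt_of_le_of_ne hfM hfeq
      have hmem : (t.map Prod.fst).foldl max f ∈ t.map Prod.fst := by
        rcases foldl_max_mem (t.map Prod.fst) f with h | h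
        · exact absurd h.symm hfeq
        · exact h
      simp only [gcpLoopA, if_neg hfeq, if_pos hlt]
      exact gcpLoopA_idx_irrel _ _ hmem (-1) i
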